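-- pv_equiv track=rewrite | github.com/realjktu/deye_mqtt | deye_invertor/deye_ha_mqtt.py | reg_to_value
-- ===== SOURCE A (Python) =====
-- def reg_to_value(regs):
--     """Decode inverter faults into readable messages."""
--     faults = {
--         13: "Working mode change",
--         18: "AC over current",
--         20: "DC over current",
--         23: "AC leak current or transient over current",
--         24: "DC insulation impedance",
--         26: "DC busbar imbalance",
--         29: "Parallel comms cable",
--         35: "No AC grid",
--         42: "AC line low voltage",
--         47: "AC freq high/low",
--         56: "DC busbar voltage low",
--         63: "ARC fault",
--         64: "Heat sink temp failure",
--     }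
--     err = []
--     off = 0
--     for b16 in regs:
--         for bit in range(16):
--             msk = 1 << bit
--             if msk & b16:
--                 msg = f"F{bit+off+1:02} " + faults.get(off + msk, "")
--                 err.append(msg.strip())
--         off += 16
--     return ", ".join(err)
-- ===== SOURCE B (Python) =====
-- def reg_to_value(regs):
--     """Decode inverter faults into readable messages."""
--     faults = {
--         13: "Working mode change",
--         18: "AC over current",
--         20: "DC over current",
--         23: "AC leak current or transient over current",
--         24: "DC insulation impedance",
--         26: "DC busbar imbalance",
--         29: "Parallel comms cable",
--         35: "No AC grid",
--         42: "AC line low voltage",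
--         47: "AC freq high/low",
--         56: "DC busbar voltage low",
--         63: "ARC fault",
--         64: "Heat sink temp failure",
--     }
--     err = []
--     off = 0
--     for b16 in regs:
--         v = b16 & 0xFFFF          # the 16 bits this register contributes
--         while v:                  # visit only the set bits, lowest first
--             nv = v & (v - 1)      # v with its lowest set bit cleared
--             lb = v ^ nv           # the lowest set bit itself (a power of two)
--             bit = lb.bit_length() - 1
--             msg = f"F{bit+off+1:02} " + faults.get(off + lb, "")
--             err.append(msg.strip())
--             v = nv
--         off += 16
--     return ", ".join(err)
-- ===== Notes on version B (the rewrite author's own statement) =====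
-- stated objective: alternative
-- what changed: The inner 'for bit in range(16)' mask scan per register is replaced by a Kernighan-style loop that repeatedly clears and reports only the lowest set bit (v &= v-1, bit from bit_length), visiting set bits in ascending order.
import Mathlib
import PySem

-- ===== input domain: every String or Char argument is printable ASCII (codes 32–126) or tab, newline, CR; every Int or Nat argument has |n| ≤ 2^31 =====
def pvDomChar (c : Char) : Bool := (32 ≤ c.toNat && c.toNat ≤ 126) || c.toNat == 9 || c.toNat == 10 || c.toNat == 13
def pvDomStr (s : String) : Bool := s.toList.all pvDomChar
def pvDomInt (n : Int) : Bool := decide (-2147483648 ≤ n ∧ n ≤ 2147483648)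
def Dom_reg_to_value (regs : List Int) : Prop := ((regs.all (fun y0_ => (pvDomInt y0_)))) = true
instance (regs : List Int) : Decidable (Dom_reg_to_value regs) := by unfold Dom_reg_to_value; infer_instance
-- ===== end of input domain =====

-- B replaces A's fixed 16-iteration mask scan of each register by a loop that visits only the
-- set bits (lowest-set-bit clearing); same return value, alternative decomposition.

-- ===== PORT A =====
-- the `faults` dict literal (identical text in both Pythons)
def pvFaults : PySem.Dict Int String := PySem.Dict.ofList
  [(13, "Working mode change"), (18, "AC over current"), (20, "DC over current"),
   (23, "AC leak current or transient over current"), (24, "DC insulation impedance"),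
   (26, "DC busbar imbalance"), (29, "Parallel comms cable"), (35, "No AC grid"),
   (42, "AC line low voltage"), (47, "AC freq high/low"), (56, "DC busbar voltage low"),
   (63, "ARC fault"), (64, "Heat sink temp failure")]

-- f"{n:02}": zero-pad to width 2 (a minus sign counts towards the width); exact for every Int
def pvFmt02 (n : Int) : String :=
  if 0 ≤ n ∧ n < 10 then "0" ++ PySem.Int.toStr n else PySem.Int.toStr n

def reg_to_value (regs : List Int) : String :=
  let faults := pvFaults
  let fin := regs.foldl (fun (st : List String × Int) b16 =>
      ((PySem.List.pyRange 0 16 1).foldl (fun (err : List String) bit =>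
        -- msk = 1 << bit; bit ∈ range(16) is nonnegative, so the shift count is exact
        let msk : Int := (1 : Int) <<< bit.toNat
        if PySem.Int.band msk b16 ≠ 0 then
          err ++ [PySem.Str.strip ("F" ++ pvFmt02 (bit + st.2 + 1) ++ " " ++
                                   PySem.Dict.getD faults (st.2 + msk) "")]
        else err) st.1,
       st.2 + 16)) ([], 0)
  PySem.Str.join ", " fin.1

-- ===== PORT B =====
-- the `while v:` loop of Source B: clear the lowest set bit each round, append its message
def pvInnerB (faults : PySem.Dict Int String) (off : Int) (v : Nat) (err : List String) :
    List String :=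
  if _hv : v = 0 then err
  else
    let nv := v &&& (v - 1)
    let lb := v ^^^ nv
    let bit : Nat := PySem.Int.bitLength (lb : Int) - 1
    pvInnerB faults off nv
      (err ++ [PySem.Str.strip ("F" ++ pvFmt02 ((bit : Int) + off + 1) ++ " " ++
                                PySem.Dict.getD faults (off + (lb : Int)) "")])
termination_by v
decreasing_by exact Nat.lt_of_le_of_lt Nat.and_le_right (by omega)

def reg_to_value_alt (regs : List Int) : String :=
  let faults := pvFaults
  let fin := regs.foldl (fun (st : List String × Int) b16 =>
      -- v = b16 & 0xFFFF is nonnegative, so carrying it as a Nat is exact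
      let v : Nat := (PySem.Int.band b16 65535).toNat
      (pvInnerB faults st.2 v st.1, st.2 + 16)) ([], 0)
  PySem.Str.join ", " fin.1

-- ===== PRECONDITION & SPEC =====
def Spec_reg_to_value (regs : List Int) (out : String) : Prop := out = reg_to_value_alt regs
instance (regs : List Int) (out : String) : Decidable (Spec_reg_to_value regs out) := by unfold Spec_reg_to_value; infer_instance

-- ===== CLAIM (what is proved, stated in full; the proofs are below) =====
def Claim_equal_reg_to_value : Prop := ∀ (regs : List Int), Dom_reg_to_value regs → Spec_reg_to_value regs (reg_to_value regs)

-- ===== LEMMAS AND PROOFS =====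

-- the sequence of lowest-set-bit values that pvInnerB consumes
def pvBits (v : Nat) : List Nat :=
  if _hv : v = 0 then [] else (v ^^^ (v &&& (v - 1))) :: pvBits (v &&& (v - 1))
termination_by v
decreasing_by exact Nat.lt_of_le_of_lt Nat.and_le_right (by omega)

-- the message Source B builds for the lowest-set-bit value lb at register offset off
def pvMsgB (off : Int) (lb : Nat) : String :=
  PySem.Str.strip ("F" ++ pvFmt02 ((((PySem.Int.bitLength (lb : Int) - 1 : Nat)) : Int) + off + 1)
    ++ " " ++ PySem.Dict.getD pvFaults (off + (lb : Int)) "")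

theorem pvInnerB_eq (off : Int) (v : Nat) (err : List String) :
    pvInnerB pvFaults off v err = err ++ (pvBits v).map (pvMsgB off) := by
  induction v using Nat.strong_induction_on generalizing err with
  | _ v ih =>
    by_cases hv : v = 0
    · simp [pvInnerB, pvBits, hv]
    · rw [pvInnerB, pvBits]
      simp only [hv, dite_false]
      rw [ih _ (Nat.lt_of_le_of_lt Nat.and_le_right (by omega))]
      simp [pvMsgB]

-- bitwise identities behind the lowest-set-bit step --------------------------

theorem pv_and_odd (w : Nat) : (2 * w + 1) &&& (2 * w) = 2 * w := by
  apply Nat.eq_of_testBit_eq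
  intro i
  cases i with
  | zero =>
    rw [Nat.testBit_and]
    simp only [Nat.testBit_zero]
    have h1 : (2 * w + 1) % 2 = 1 := by omega
    have h2 : (2 * w) % 2 = 0 := by omega
    simp [h1, h2]
  | succ i =>
    rw [Nat.testBit_and, Nat.testBit_succ, Nat.testBit_succ]
    have h1 : (2 * w + 1) / 2 = w := by omega
    have h2 : (2 * w) / 2 = w := by omega
    simp [h1, h2]

theorem pv_xor_odd (w : Nat) : (2 * w + 1) ^^^ (2 * w) = 1 := by
  apply Nat.eq_of_testBit_eq
  intro i
  cases i with
  | zero =>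
    rw [Nat.testBit_xor]
    simp only [Nat.testBit_zero]
    have h1 : (2 * w + 1) % 2 = 1 := by omega
    have h2 : (2 * w) % 2 = 0 := by omega
    simp [h1, h2]
  | succ i =>
    rw [Nat.testBit_xor, Nat.testBit_succ, Nat.testBit_succ, Nat.testBit_succ]
    have h1 : (2 * w + 1) / 2 = w := by omega
    have h2 : (2 * w) / 2 = w := by omega
    have h3 : (1:Nat) / 2 = 0 := by omega
    simp [h1, h2, h3]

theorem pv_and_even (w : Nat) (hw : 0 < w) : (2 * w) &&& (2 * w - 1) = 2 * (w &&& (w - 1)) := by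
  apply Nat.eq_of_testBit_eq
  intro i
  cases i with
  | zero =>
    rw [Nat.testBit_and]
    simp only [Nat.testBit_zero]
    have h1 : (2 * w) % 2 = 0 := by omega
    have h2 : (2 * (w &&& (w - 1))) % 2 = 0 := by omega
    simp [h1, h2]
  | succ i =>
    rw [Nat.testBit_and, Nat.testBit_succ, Nat.testBit_succ, Nat.testBit_succ]
    have h1 : (2 * w) / 2 = w := by omega
    have h2 : (2 * w - 1) / 2 = w - 1 := by omega
    have h3 : (2 * (w &&& (w - 1))) / 2 = w &&& (w - 1) := by omega
    rw [h1, h2, h3, ← Nat.testBit_and]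

theorem pv_xor_even (a b : Nat) : (2 * a) ^^^ (2 * b) = 2 * (a ^^^ b) := by
  apply Nat.eq_of_testBit_eq
  intro i
  cases i with
  | zero =>
    rw [Nat.testBit_xor]
    simp only [Nat.testBit_zero]
    have h1 : (2 * a) % 2 = 0 := by omega
    have h2 : (2 * b) % 2 = 0 := by omega
    have h3 : (2 * (a ^^^ b)) % 2 = 0 := by omega
    simp [h1, h2, h3]
  | succ i =>
    rw [Nat.testBit_xor, Nat.testBit_succ, Nat.testBit_succ, Nat.testBit_succ]
    have h1 : (2 * a) / 2 = a := by omega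
    have h2 : (2 * b) / 2 = b := by omega
    have h3 : (2 * (a ^^^ b)) / 2 = a ^^^ b := by omega
    rw [h1, h2, h3, ← Nat.testBit_xor]

theorem pvBits_pos (v : Nat) (h : v ≠ 0) :
    pvBits v = (v ^^^ (v &&& (v - 1))) :: pvBits (v &&& (v - 1)) := by
  rw [pvBits]; simp [h]

theorem pvBits_shift (w : Nat) : pvBits (2 * w) = (pvBits w).map (2 * ·) := by
  induction w using Nat.strong_induction_on with
  | _ w ih =>
    by_cases hw : w = 0
    · simp [pvBits, hw]
    · rw [pvBits_pos (2 * w) (by omega), pvBits_pos w hw]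
      rw [pv_and_even w (by omega), pv_xor_even]
      rw [ih _ (Nat.lt_of_le_of_lt Nat.and_le_right (by omega))]
      simp

-- the lowest-set-bit values are the powers of two at the set bits, in ascending order
theorem pvBits_eq_filter (v : Nat) : ∀ n, v < 2 ^ n →
    pvBits v = ((List.range n).filter v.testBit).map (2 ^ ·) := by
  induction v using Nat.strong_induction_on with
  | _ v ih =>
    intro n hv
    by_cases h0 : v = 0
    · subst h0
      simp [pvBits, Nat.zero_testBit]
    · have hn : n ≠ 0 := by
        rintro rfl; simp at hv; omega
      obtain ⟨m, rfl⟩ : ∃ m, n = m + 1 := ⟨n - 1, by omega⟩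
      have hpow : 2 ^ (m + 1) = 2 * 2 ^ m := by ring
      have hrange : List.range (m + 1) = 0 :: List.map Nat.succ (List.range m) :=
        List.range_succ_eq_map
      rcases Nat.even_or_odd v with ⟨w, hw⟩ | ⟨w, hw⟩
      · have hww : v = 2 * w := by omega
        subst hww
        rw [pvBits_shift, ih w (by omega) m (by omega)]
        rw [hrange]
        have ht0 : (2 * w).testBit 0 = false := by
          simp [Nat.testBit_zero]
        simp only [List.filter_cons, ht0, List.filter_map]
        have hcomp : ((2 * w).testBit ∘ Nat.succ) = w.testBit := by
          funext k
          simp only [Function.comp, Nat.succ_eq_add_one, Nat.testBit_succ]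
          congr 1
          omega
        rw [hcomp]
        simp only [Bool.false_eq_true, if_false, List.map_map]
        apply List.map_congr_left
        intro k _
        simp [Function.comp, pow_succ]
        ring
      · have hww : v = 2 * w + 1 := by omega
        subst hww
        rw [pvBits_pos _ h0]
        simp only [Nat.add_sub_cancel]
        rw [pv_and_odd, pv_xor_odd, pvBits_shift, ih w (by omega) m (by omega)]
        rw [hrange]
        have ht0 : (2 * w + 1).testBit 0 = true := by
          simp [Nat.testBit_zero]
        simp only [List.filter_cons, ht0, List.filter_map, if_true]
        have hcomp : ((2 * w + 1).testBit ∘ Nat.succ) = w.testBit := by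
          funext k
          simp only [Function.comp, Nat.succ_eq_add_one, Nat.testBit_succ]
          congr 1
          omega
        rw [hcomp]
        simp only [List.map_map, List.map_cons, pow_zero]
        congr 1
        apply List.map_congr_left
        intro k _
        simp [Function.comp, pow_succ]
        ring

-- lb.bit_length() - 1 recovers the bit index of a power of two
theorem pv_bitLength_pow (k : Nat) : PySem.Int.bitLength ((2 ^ k : Nat) : Int) - 1 = k := by
  induction k with
  | zero =>
    have h := PySem.Int.bitLength_natCast (m := 1) (by omega)
    norm_num [PySem.Int.bitLength_zero] at h
    norm_num [h]
  | succ k ihk =>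
    have hpos : 0 < 2 ^ (k + 1) := by positivity
    have h := PySem.Int.bitLength_natCast (m := 2 ^ (k + 1)) hpos
    have hdiv : 2 ^ (k + 1) / 2 = 2 ^ k := by
      rw [pow_succ, Nat.mul_div_cancel _ (by omega)]
    rw [hdiv] at h
    have hlt := PySem.Int.lt_two_pow_bitLength ((2 ^ k : Nat) : Int)
    have hna : (((2 ^ k : Nat) : Int)).natAbs = 2 ^ k := by simp
    rw [hna] at hlt
    have hkb : k < PySem.Int.bitLength ((2 ^ k : Nat) : Int) :=
      (Nat.pow_lt_pow_iff_right (by omega)).mp hlt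
    rw [h]
    omega

-- subtracting from an all-ones block flips the low bits
theorem pv_testBit_comp : ∀ (n y k : Nat), y < 2 ^ n → k < n →
    ((2 ^ n - 1) - y).testBit k = !(y.testBit k) := by
  intro n
  induction n with
  | zero => omega
  | succ m ih =>
    intro y k hy hk
    have hpow : 2 ^ (m + 1) = 2 * 2 ^ m := by ring
    have hym : y / 2 < 2 ^ m := by omega
    have hval : (2 ^ (m + 1) - 1) - y = 2 * ((2 ^ m - 1) - y / 2) + (1 - y % 2) := by
      omega
    rw [hval]
    cases k with
    | zero =>
      simp only [Nat.testBit_zero]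
      have h2 : (2 * ((2 ^ m - 1) - y / 2) + (1 - y % 2)) % 2 = 1 - y % 2 := by omega
      rw [h2]
      rcases Nat.mod_two_eq_zero_or_one y with h | h <;> simp [h]
    | succ k =>
      rw [Nat.testBit_succ, Nat.testBit_succ]
      have hd : (2 * ((2 ^ m - 1) - y / 2) + (1 - y % 2)) / 2 = (2 ^ m - 1) - y / 2 := by omega
      rw [hd]
      exact ih (y / 2) k hym (by omega)

-- b16 & 0xFFFF is a Nat below 2^16
theorem pv_band_mask (b : Int) : ∃ m : Nat, PySem.Int.band b 65535 = (m : Int) ∧ m < 65536 := by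
  rcases le_or_gt 0 b with hb | hb
  · refine ⟨b.toNat &&& 65535, ?_, ?_⟩
    · have h65535 : (65535 : Int) = ((65535 : Nat) : Int) := by norm_num
      rw [h65535, PySem.Int.band_of_nonneg hb (by norm_num)]
      simp
    · have := @Nat.and_le_right b.toNat 65535
      omega
  · refine ⟨65535 - (65535 &&& (-b - 1).toNat), ?_, by omega⟩
    have hb1 : ¬ ((0:Int) ≤ b) := by omega
    simp only [PySem.Int.band, hb1, if_false]
    simp [Int.pred_toNat]

-- A's per-bit truthiness test agrees with the bits of B's masked value
theorem pv_band_test (b : Int) (k : Nat) (hk : k < 16) :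
    (PySem.Int.band ((1 : Int) <<< k) b ≠ 0) ↔
      ((PySem.Int.band b 65535).toNat).testBit k = true := by
  have hshift : ((1 : Int) <<< k) = ((2 ^ k : Nat) : Int) := by
    rw [Int.shiftLeft_eq]; push_cast; ring
  have ht65535 : (65535 : Nat).testBit k = true := by
    have h : (65535 : Nat) = 2 ^ 16 - 1 := by norm_num
    rw [h, Nat.testBit_two_pow_sub_one]
    simp [hk]
  have hkpos : 0 < 2 ^ k := by positivity
  rcases le_or_gt 0 b with hb | hb
  · have h65535 : (65535 : Int) = ((65535 : Nat) : Int) := by norm_num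
    rw [hshift, h65535, PySem.Int.band_of_nonneg (by positivity) hb,
        PySem.Int.band_of_nonneg hb (by norm_num)]
    simp only [Int.toNat_natCast]
    rw [Nat.two_pow_and, Nat.testBit_and, ht65535]
    cases hbt : b.toNat.testBit k
    · simp
    · simp
  · set nb : Nat := (-b - 1).toNat with hnb
    have hb1 : ¬ ((0:Int) ≤ b) := by omega
    have hL : PySem.Int.band ((1 : Int) <<< k) b = ((2 ^ k - (2 ^ k &&& nb) : Nat) : Int) := by
      rw [hshift]
      have h2 : (0:Int) ≤ ((2 ^ k : Nat) : Int) := by positivity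
      simp only [PySem.Int.band]
      rw [if_pos h2, if_neg hb1]
      simp only [Int.toNat_natCast, hnb, Int.pred_toNat]
    have hR : PySem.Int.band b 65535 = ((65535 - (65535 &&& nb) : Nat) : Int) := by
      simp only [PySem.Int.band, hb1, if_false]
      simp [hnb, Int.pred_toNat]
    rw [hL, hR]
    have hand : 2 ^ k &&& nb = 2 ^ k * (nb.testBit k).toNat := Nat.two_pow_and nb k
    have hand2 : (65535 &&& nb).testBit k = nb.testBit k := by
      rw [Nat.testBit_and, ht65535]
      simp
    have hylt : 65535 &&& nb < 2 ^ 16 := by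
      have : 65535 &&& nb ≤ 65535 := @Nat.and_le_left 65535 nb
      omega
    have hcomp := pv_testBit_comp 16 (65535 &&& nb) k hylt (by omega)
    have h16 : (2:Nat) ^ 16 - 1 = 65535 := by norm_num
    rw [h16] at hcomp
    simp only [Int.toNat_natCast]
    rw [hcomp, hand2]
    cases hbt : nb.testBit k
    · rw [hand, hbt]
      simp
    · rw [hand, hbt]
      simp

-- the two per-register loop bodies produce the same state
theorem pv_step_eq (st : List String × Int) (b16 : Int) :
    ((PySem.List.pyRange 0 16 1).foldl (fun (err : List String) bit =>
        let msk : Int := (1 : Int) <<< bit.toNat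
        if PySem.Int.band msk b16 ≠ 0 then
          err ++ [PySem.Str.strip ("F" ++ pvFmt02 (bit + st.2 + 1) ++ " " ++
                                   PySem.Dict.getD pvFaults (st.2 + msk) "")]
        else err) st.1,
      st.2 + 16) =
    (pvInnerB pvFaults st.2 ((PySem.Int.band b16 65535).toNat) st.1, st.2 + 16) := by
  congr 1
  set m : Nat := (PySem.Int.band b16 65535).toNat with hm
  have hmlt : m < 2 ^ 16 := by
    obtain ⟨m', hm', hlt⟩ := pv_band_mask b16
    rw [hm, hm']
    simpa using hlt
  rw [pvInnerB_eq, pvBits_eq_filter m 16 hmlt]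
  rw [PySem.List.pyRange_zero 16]
  have h16 : (16 : Int).toNat = 16 := rfl
  rw [h16, List.foldl_map]
  rw [PySem.List.foldl_congr_mem (List.range 16) _
    (fun (err : List String) (k : Nat) =>
      if (decide (PySem.Int.band ((1:Int) <<< k) b16 ≠ 0)) = true then
        err ++ [PySem.Str.strip ("F" ++ pvFmt02 ((k : Int) + st.2 + 1) ++ " " ++
                                 PySem.Dict.getD pvFaults (st.2 + ((1:Int) <<< k)) "")]
      else err) st.1
    (by
      intro acc k _
      simp only [decide_eq_true_eq, Int.toNat_natCast, Int.shiftLeft_natCast_right])]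
  rw [PySem.List.foldl_append_if]
  congr 1
  have hfil : List.filter (fun (k : Nat) => decide (PySem.Int.band ((1:Int) <<< k) b16 ≠ 0))
        (List.range 16)
      = List.filter (fun (k : Nat) => m.testBit k) (List.range 16) := by
    apply List.filter_congr
    intro k hk
    have hk16 : k < 16 := List.mem_range.mp hk
    rw [Bool.eq_iff_iff]
    simp only [decide_eq_true_eq]
    exact pv_band_test b16 k hk16
  rw [hfil, List.map_map]
  apply List.map_congr_left
  intro k hkmem
  simp only [Function.comp]
  rw [pvMsgB, pv_bitLength_pow]
  have hshift : ((1:Int) <<< k) = ((2 ^ k : Nat) : Int) := by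
    rw [Int.shiftLeft_eq]; push_cast; ring
  rw [hshift]

-- ===== VERDICT (by name: the statement is the Claim_ definition above) =====
theorem reg_to_value_spec : Claim_equal_reg_to_value := by
  intro regs _
  unfold Spec_reg_to_value reg_to_value reg_to_value_alt
  simp only
  apply congrArg (fun l => PySem.Str.join ", " l)
  apply congrArg Prod.fst
  apply PySem.List.foldl_congr_mem
  intro st b16 _
  exact pv_step_eq st b16
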